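-- pv_equiv track=rewrite | github.com/DuarteArribas/APPSClone | development/APPSClone_Client/appsclone_client/utils/helper.py | isValidAbsolutePathToFile
-- ===== SOURCE A (Python) =====
-- def isValidAbsolutePathToFile(path):
--   """Validate an absolute path to a file.
--
--   Parameters
--   ----------
--   path : str
--     The path to validate
--
--   Returns
--   ----------
--   bool
--     True if the absolute path to a file is valid and False otherwise
--   """
--   if path:
--     startWithSlash = True if path[0] == "/" else False
--     endWithSlash   = True if path[-1] == "/" else False
--     validLength    = all([True if len(file) <= 255 else False for file in path.split("/")]) and len(path) < 4096
--     return startWithSlash and not endWithSlash and validLength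
--   else:
--     return False
-- ===== SOURCE B (Python) =====
-- def isValidAbsolutePathToFile(path):
--   """Single character-by-character pass with a running segment-length counter,
--   instead of split + comprehension + all."""
--   if not path:
--     return False
--   seg = 0
--   ok = True
--   for ch in path:
--     if ch == '/':
--       if seg > 255:
--         ok = False
--       seg = 0
--     else:
--       seg += 1
--   if seg > 255:
--     ok = False
--   return path[0] == '/' and path[-1] != '/' and len(path) < 4096 and ok
-- ===== Notes on version B (the rewrite author's own statement) =====
-- stated objective: alternative
-- what changed: Replaced the split-on-slash + list-comprehension + all pipeline with a single character-by-character pass maintaining a running segment-length counter (no intermediate list of segments is built).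
import Mathlib
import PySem

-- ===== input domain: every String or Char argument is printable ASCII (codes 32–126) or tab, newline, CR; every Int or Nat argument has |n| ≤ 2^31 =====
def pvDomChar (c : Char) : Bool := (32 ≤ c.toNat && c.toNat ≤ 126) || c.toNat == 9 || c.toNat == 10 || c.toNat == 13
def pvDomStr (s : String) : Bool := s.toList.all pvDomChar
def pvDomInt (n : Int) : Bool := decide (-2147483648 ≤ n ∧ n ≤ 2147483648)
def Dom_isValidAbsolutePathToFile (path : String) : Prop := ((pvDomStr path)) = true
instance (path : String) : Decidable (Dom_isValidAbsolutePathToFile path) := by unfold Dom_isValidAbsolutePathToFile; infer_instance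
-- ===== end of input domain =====

-- B replaces split('/') + comprehension + all by one char-by-char pass with a running segment counter (alternative decomposition, same cost).

-- ===== PORT A =====
def isValidAbsolutePathToFile (path : String) : Bool :=
  let l := path.toList
  if l.isEmpty then false
  else
    let startWithSlash := PySem.List.pyGet? l 0 == some '/'
    let endWithSlash := PySem.List.pyGet? l (-1) == some '/'
    let validLength :=
      (((PySem.Chars.splitOn l ['/']).map
          (fun file => if file.length ≤ 255 then true else false)).all id)
        && decide (l.length < 4096)
    startWithSlash && !endWithSlash && validLength

-- ===== PORT B =====
-- the for-loop over path's characters, state = (seg, ok)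
def pvBLoop : List Char → Nat × Bool → Nat × Bool
  | [], st => st
  | c :: rest, (seg, ok) =>
    if c = '/' then pvBLoop rest (0, ok && !decide (seg > 255))
    else pvBLoop rest (seg + 1, ok)

def isValidAbsolutePathToFile_alt (path : String) : Bool :=
  let l := path.toList
  if l.isEmpty then false
  else
    let st := pvBLoop l (0, true)
    let ok := st.2 && !decide (st.1 > 255)
    (PySem.List.pyGet? l 0 == some '/')
      && !(PySem.List.pyGet? l (-1) == some '/')
      && decide (l.length < 4096)
      && ok

-- ===== PRECONDITION & SPEC =====
def Spec_isValidAbsolutePathToFile (path : String) (out : Bool) : Prop := out = isValidAbsolutePathToFile_alt path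
instance (path : String) (out : Bool) : Decidable (Spec_isValidAbsolutePathToFile path out) := by unfold Spec_isValidAbsolutePathToFile; infer_instance

-- ===== CLAIM (what is proved, stated in full; the proofs are below) =====
def Claim_equal_isValidAbsolutePathToFile : Prop := ∀ (path : String), Dom_isValidAbsolutePathToFile path → Spec_isValidAbsolutePathToFile path (isValidAbsolutePathToFile path)

-- ===== LEMMAS AND PROOFS =====

-- "every segment has length ≤ 255", computed B-style with a running counter
def pvSegRun : List Char → Nat → Bool
  | [], k => decide (k ≤ 255)
  | c :: rest, k => if c = '/' then decide (k ≤ 255) && pvSegRun rest 0 else pvSegRun rest (k + 1)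

lemma pvGo_all (l : List Char) : ∀ (fuel : Nat) (cur : List Char) (acc : List (List Char)),
    l.length ≤ fuel →
    ((PySem.Chars.splitOn.go ['/'] fuel l cur acc).all (fun f => decide (f.length ≤ 255)))
      = (acc.all (fun f => decide (f.length ≤ 255)) && pvSegRun l cur.length) := by
  induction l with
  | nil =>
    intro fuel cur acc _
    cases fuel <;>
      simp [PySem.Chars.splitOn.go, pvSegRun, Bool.and_comm]
  | cons c rest ih =>
    intro fuel cur acc h
    cases fuel with
    | zero => simp at h
    | succ f =>
      have hf : rest.length ≤ f := by simpa using h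
      by_cases hc : c = '/'
      · subst hc
        rw [show PySem.Chars.splitOn.go ['/'] (f + 1) ('/' :: rest) cur acc
              = PySem.Chars.splitOn.go ['/'] f rest [] (cur.reverse :: acc) from by
            simp [PySem.Chars.splitOn.go, List.isPrefixOf]]
        rw [ih f [] (cur.reverse :: acc) hf]
        simp [pvSegRun, Bool.and_assoc, Bool.and_comm]
      · rw [show PySem.Chars.splitOn.go ['/'] (f + 1) (c :: rest) cur acc
              = PySem.Chars.splitOn.go ['/'] f rest (c :: cur) acc from by
            simp [PySem.Chars.splitOn.go, List.isPrefixOf, Ne.symm hc]]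
        rw [ih f (c :: cur) acc hf]
        simp [pvSegRun, hc]

lemma pvSplitOn_all (l : List Char) :
    ((PySem.Chars.splitOn l ['/']).all (fun f => decide (f.length ≤ 255))) = pvSegRun l 0 := by
  have := pvGo_all l (l.length + 1) [] [] (by omega)
  simpa [PySem.Chars.splitOn] using this

lemma pvBLoop_eq_segRun (l : List Char) : ∀ (seg : Nat) (ok : Bool),
    ((pvBLoop l (seg, ok)).2 && !decide ((pvBLoop l (seg, ok)).1 > 255))
      = (ok && pvSegRun l seg) := by
  induction l with
  | nil =>
    intro seg ok
    by_cases h : seg ≤ 255 <;> simp [pvBLoop, pvSegRun, h]; omega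
  | cons c rest ih =>
    intro seg ok
    by_cases hc : c = '/'
    · subst hc
      rw [show pvBLoop ('/' :: rest) (seg, ok) = pvBLoop rest (0, ok && !decide (seg > 255)) from by
        simp [pvBLoop]]
      rw [ih 0 (ok && !decide (seg > 255))]
      by_cases h : seg ≤ 255 <;>
        simp [pvSegRun, h, Nat.lt_of_not_le, Nat.not_lt_of_le]
    · rw [show pvBLoop (c :: rest) (seg, ok) = pvBLoop rest (seg + 1, ok) from by
        simp [pvBLoop, hc]]
      rw [ih (seg + 1) ok]
      simp [pvSegRun, hc]

-- ===== VERDICT (by name: the statement is the Claim_ definition above) =====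
theorem isValidAbsolutePathToFile_spec : Claim_equal_isValidAbsolutePathToFile := by
  intro path _
  unfold Spec_isValidAbsolutePathToFile isValidAbsolutePathToFile isValidAbsolutePathToFile_alt
  by_cases h : path.toList.isEmpty
  · simp [h]
  · simp only [h, if_neg, Bool.false_eq_true, not_false_eq_true]
    rw [pvBLoop_eq_segRun path.toList 0 true]
    have hfun : (fun (file : List Char) => if file.length ≤ 255 then true else false)
        = (fun f => decide (f.length ≤ 255)) := by
      funext f; by_cases h : f.length ≤ 255 <;> simp [h]
    rw [hfun, List.all_map]
    simp only [Function.comp_def, id]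
    rw [pvSplitOn_all]
    simp [Bool.and_assoc, Bool.and_comm, Bool.and_left_comm]
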